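-- pv_equiv track=rewrite | github.com/azmat21/python-translate | utils.py | plaintexttolines
-- ===== SOURCE A (Python) =====
-- def plaintexttolines(text):
--     outlines = []
--     words = text.split()
--     for w in words:
--         if w[-1] in [".", ",", "!", ":", ";", "\""]:
--             outlines.append("\t".join(["O", "x", "x", "x", "x", w[:-1], "x", "x", "x"]) + "\n")
--             outlines.append("\t".join(["O", "x", "x", "x", "x", w[-1], "x", "x", "x"]) + "\n")
--         else:
--             outlines.append("\t".join(["O", "x", "x", "x", "x", w, "x", "x", "x"]) + "\n")
--
--     return outlines
-- ===== SOURCE B (Python) =====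
-- _PUNCT = ".,!:;\""
-- _FMT = "O\tx\tx\tx\tx\t%s\tx\tx\tx\n"
--
--
-- def _flush(out, buf):
--     if buf:
--         w = "".join(buf)
--         if w[-1] in _PUNCT:
--             out.append(_FMT % w[:-1])
--             out.append(_FMT % w[-1])
--         else:
--             out.append(_FMT % w)
--
--
-- def plaintexttolines(text):
--     out = []
--     buf = []
--     for ch in text:
--         if ch.isspace():
--             _flush(out, buf)
--             buf = []
--         else:
--             buf.append(ch)
--     _flush(out, buf)
--     return out
-- ===== Notes on version B (the rewrite author's own statement) =====
-- stated objective: alternative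
-- what changed: A calls text.split() and loops over the resulting words; B never splits: it is a single character-level state machine over text that accumulates a buffer and flushes the formatted line(s) for a word at each whitespace boundary, formatting via a %-style template instead of join.
import Mathlib
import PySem

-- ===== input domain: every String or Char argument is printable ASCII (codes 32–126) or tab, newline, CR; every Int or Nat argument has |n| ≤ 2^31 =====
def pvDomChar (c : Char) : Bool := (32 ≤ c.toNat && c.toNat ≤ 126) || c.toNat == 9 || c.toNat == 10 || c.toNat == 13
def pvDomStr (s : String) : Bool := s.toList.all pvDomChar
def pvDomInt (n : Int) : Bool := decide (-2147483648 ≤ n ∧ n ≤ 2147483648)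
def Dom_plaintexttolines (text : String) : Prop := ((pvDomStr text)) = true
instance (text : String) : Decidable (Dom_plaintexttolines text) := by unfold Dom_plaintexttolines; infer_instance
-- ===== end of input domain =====

-- B replaces A's split()-then-loop-over-words with a single character-level state machine
-- (buffer + flush at whitespace boundaries) that never calls split (objective: alternative).

-- ===== PORT A =====
-- '"\t".join(["O","x","x","x","x", t, "x","x","x"]) + "\n"'
-- ('+ "\n"' ported by hand as appending the newline code point; exact on all strings)
def pvFmtLine (t : String) : String :=
  String.ofList (PySem.Chars.join ['\t']
    [['O'], ['x'], ['x'], ['x'], ['x'], t.toList, ['x'], ['x'], ['x']] ++ ['\n'])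

-- the loop body of A; the 'none' branch is unreachable (words from split() are nonempty)
def pvStepA (outlines : List String) (w : String) : List String :=
  match PySem.Str.pyGet? w (-1) with
  | some c =>
      if c ∈ ['.', ',', '!', ':', ';', '"'] then
        (outlines ++ [pvFmtLine (PySem.Str.slice w none (some (-1)))]) ++ [pvFmtLine (String.ofList [c])]
      else
        outlines ++ [pvFmtLine w]
  | none => outlines

def plaintexttolines (text : String) : List String :=
  (PySem.Str.split₀ text).foldl pvStepA []

-- ===== PORT B =====
-- Source B's '_FMT % s' : "O\tx\tx\tx\tx\t%s\tx\tx\tx\n" with s spliced in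
-- (ported by hand as concatenation of the two literal pieces around s; exact)
def pvFmtB (s : List Char) : String :=
  String.ofList ("O\tx\tx\tx\tx\t".toList ++ s ++ "\tx\tx\tx\n".toList)

-- Source B's '_flush(out, buf)'
def pvFlushB (out : List String) (buf : List Char) : List String :=
  if buf.isEmpty then out
  else
    match PySem.List.pyGet? buf (-1) with
    | some c =>
        if c ∈ ['.', ',', '!', ':', ';', '"'] then
          (out ++ [pvFmtB (PySem.List.slice buf none (some (-1)))]) ++ [pvFmtB [c]]
        else out ++ [pvFmtB buf]
    | none => out

-- Source B's character loop: state = (out, buf)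
def pvScanB : List Char → List String → List Char → List String
  | [], out, buf => pvFlushB out buf
  | c :: rest, out, buf =>
      if PySem.Chars.isspace c then pvScanB rest (pvFlushB out buf) []
      else pvScanB rest out (buf ++ [c])

def plaintexttolines_alt (text : String) : List String :=
  pvScanB text.toList [] []

-- ===== PRECONDITION & SPEC =====
def Spec_plaintexttolines (text : String) (out : List String) : Prop := out = plaintexttolines_alt text
instance (text : String) (out : List String) : Decidable (Spec_plaintexttolines text out) := by unfold Spec_plaintexttolines; infer_instance

-- ===== CLAIM =====
def Claim_equal_plaintexttolines : Prop := ∀ (text : String), Dom_plaintexttolines text → Spec_plaintexttolines text (plaintexttolines text)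

-- ===== LEMMAS AND PROOFS =====

-- the lines both programs emit for one (possibly empty) word
def pvWordLines (w : List Char) : List String :=
  match PySem.List.pyGet? w (-1) with
  | some c =>
      if c ∈ ['.', ',', '!', ':', ';', '"'] then
        [pvFmtB (PySem.List.slice w none (some (-1))), pvFmtB [c]]
      else [pvFmtB w]
  | none => []

lemma pvFmtB_eq_fmtLine (s : List Char) : pvFmtB s = pvFmtLine (String.ofList s) := by
  simp [pvFmtB, pvFmtLine, PySem.Chars.join, List.intercalate]

lemma pvFlushB_eq (out : List String) (buf : List Char) :
    pvFlushB out buf = out ++ pvWordLines buf := by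
  unfold pvFlushB pvWordLines
  rcases buf with _ | ⟨c, cs⟩
  · simp [PySem.List.pyGet?]
  · cases h : PySem.List.pyGet? (c :: cs) (-1) with
    | none => simp
    | some d => by_cases hp : d ∈ ['.', ',', '!', ':', ';', '"'] <;> simp [hp]

lemma pvStepA_eq (acc : List String) (w : List Char) :
    pvStepA acc (String.ofList w) = acc ++ pvWordLines w := by
  unfold pvStepA pvWordLines
  simp only [PySem.Str.pyGet?_eq, PySem.Str.slice]
  simp only [String.toList_ofList]
  cases h : PySem.List.pyGet? w (-1) with
  | none => simp [h]
  | some c =>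
      by_cases hp : c ∈ ['.', ',', '!', ':', ';', '"'] <;>
        simp [h, hp, pvFmtB_eq_fmtLine]

lemma pvFoldA_eq (ws : List (List Char)) (acc : List String) :
    (ws.map String.ofList).foldl pvStepA acc = acc ++ ws.flatMap pvWordLines := by
  induction ws generalizing acc with
  | nil => simp
  | cons w ws ih => simp [pvStepA_eq, ih]

-- split₀.go's accumulator just prepends (reversed)
lemma split₀_go_acc (cs : List Char) (cur : List Char) (acc : List (List Char)) :
    PySem.Chars.split₀.go cs cur acc = acc.reverse ++ PySem.Chars.split₀.go cs cur [] := by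
  induction cs generalizing cur acc with
  | nil =>
      unfold PySem.Chars.split₀.go
      by_cases h : cur.isEmpty <;> simp [h]
  | cons c rest ih =>
      unfold PySem.Chars.split₀.go
      by_cases hs : PySem.Chars.isspace c
      · by_cases h : cur.isEmpty
        · simp only [hs, h, if_true]; exact ih [] acc
        · simp only [hs, h, if_true, Bool.false_eq_true, if_false]
          rw [ih [] (cur.reverse :: acc), ih [] [cur.reverse]]
          simp
      · simp only [hs, Bool.false_eq_true, if_false]; exact ih (c :: cur) acc

-- the char scan equals flat-mapping the word lines over split₀'s words
lemma pvScanB_eq (cs : List Char) (out : List String) (buf : List Char) :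
    pvScanB cs out buf
      = out ++ (PySem.Chars.split₀.go cs buf.reverse []).flatMap pvWordLines := by
  induction cs generalizing out buf with
  | nil =>
      unfold pvScanB PySem.Chars.split₀.go
      by_cases h : buf.isEmpty
      · rcases List.isEmpty_iff.mp h with rfl
        simp [pvFlushB_eq, pvWordLines, PySem.List.pyGet?]
      · have h' : buf.reverse.isEmpty = false := by
          simp only [List.isEmpty_reverse]; exact Bool.not_eq_true _ ▸ (by simpa using h)
        simp [h', pvFlushB_eq]
  | cons c rest ih =>
      unfold pvScanB PySem.Chars.split₀.go
      by_cases hs : PySem.Chars.isspace c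
      · by_cases h : buf.isEmpty
        · rcases List.isEmpty_iff.mp h with rfl
          simp [hs, pvFlushB_eq, pvWordLines, PySem.List.pyGet?, ih]
        · have h' : buf.reverse.isEmpty = false := by
            simp only [List.isEmpty_reverse]; exact Bool.not_eq_true _ ▸ (by simpa using h)
          simp only [hs, if_true, h', Bool.false_eq_true, if_false]
          rw [ih, split₀_go_acc rest [] [buf.reverse.reverse]]
          simp [pvFlushB_eq]
      · simp only [hs, Bool.false_eq_true, if_false]
        rw [ih]
        congr 2
        simp
-- ===== VERDICT =====
theorem plaintexttolines_spec : Claim_equal_plaintexttolines := by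
  intro text _
  unfold Spec_plaintexttolines plaintexttolines plaintexttolines_alt
  rw [PySem.Str.split₀, pvFoldA_eq, pvScanB_eq]
  rfl
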